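-- pv_equiv track=rewrite | github.com/mahikgot/164_SCV_Decoder | ecc.py | polynomialMult
-- ===== SOURCE A (Python) =====
-- def polynomialMult(a,b): #Helper function to multiply polynomials
--     s1 = a
--     s2 = b
--     res = [0]*(len(s1)+len(s2)-1)
--     for o1,i1 in enumerate(s1):
--         for o2,i2 in enumerate(s2):
--             res[o1+o2] += i1*i2 % 929
--     return res
-- ===== SOURCE B (Python) =====
-- def polynomialMult(a, b):  # gather convolution: one local accumulator per output index
--     n = len(a) + len(b) - 1
--     res = [0] * n
--     for k in range(n):
--         lo = max(0, k - len(b) + 1)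
--         hi = min(k, len(a) - 1) + 1
--         acc = 0
--         for i in range(lo, hi):
--             acc += a[i] * b[k - i] % 929
--         res[k] = acc
--     return res
-- ===== Notes on version B (the rewrite author's own statement) =====
-- stated objective: alternative
-- what changed: Replaced A's scatter over all input pairs (mutating a shared result array) by a gather convolution that computes each output coefficient independently with a local accumulator over the exact overlap range.
import Mathlib
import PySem

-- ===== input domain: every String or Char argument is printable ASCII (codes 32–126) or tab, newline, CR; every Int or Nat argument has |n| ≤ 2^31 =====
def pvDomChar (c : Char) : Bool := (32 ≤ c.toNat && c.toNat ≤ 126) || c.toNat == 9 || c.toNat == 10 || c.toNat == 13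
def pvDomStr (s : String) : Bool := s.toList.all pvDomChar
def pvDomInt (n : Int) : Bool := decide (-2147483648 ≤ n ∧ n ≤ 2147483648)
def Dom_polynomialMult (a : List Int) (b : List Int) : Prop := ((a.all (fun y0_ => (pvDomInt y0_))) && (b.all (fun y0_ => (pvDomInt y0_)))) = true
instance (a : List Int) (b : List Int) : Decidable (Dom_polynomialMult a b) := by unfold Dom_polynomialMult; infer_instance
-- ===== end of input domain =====

-- B replaces A's pair-by-pair scatter into a shared array by a per-output-index gather
-- with a local accumulator (alternative decomposition, same cost).

-- ===== PORT A =====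
-- res[o1+o2] += i1*i2 % 929 ; the index o1+o2 is always nonnegative and in range here,
-- so toNat/set/getD are exact.
def polynomialMult (a : List Int) (b : List Int) : List Int :=
  let s1 := a
  let s2 := b
  let res := List.replicate (s1.length + s2.length - 1) (0 : Int)
  (PySem.List.enumerate s1 0).foldl (fun res p =>
    (PySem.List.enumerate s2 0).foldl (fun res q =>
      res.set (p.1 + q.1).toNat (res.getD (p.1 + q.1).toNat 0 + PySem.Int.mod (p.2 * q.2) 929)) res) res

-- ===== PORT B =====
-- for each k: acc = sum over i in [max(0,k-len(b)+1), min(k,len(a)-1)+1) of a[i]*b[k-i]%929;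
-- bounds computed in Int exactly as in the Python (len(a)-1 can be -1); indices in range, getD exact.
def polynomialMult_alt (a : List Int) (b : List Int) : List Int :=
  let n := a.length + b.length - 1
  (List.range n).map (fun (k : Nat) =>
    let lo : Int := max 0 ((k : Int) - (b.length : Int) + 1)
    let hi : Int := min (k : Int) ((a.length : Int) - 1) + 1
    (List.range' lo.toNat (hi - lo).toNat).foldl
      (fun acc i => acc + PySem.Int.mod (a.getD i 0 * b.getD (k - i) 0) 929) 0)

-- ===== PRECONDITION & SPEC =====
def Spec_polynomialMult (a : List Int) (b : List Int) (out : List Int) : Prop := out = polynomialMult_alt a b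
instance (a : List Int) (b : List Int) (out : List Int) : Decidable (Spec_polynomialMult a b out) := by unfold Spec_polynomialMult; infer_instance

-- ===== CLAIM (what is proved, stated in full; the proofs are below) =====
def Claim_equal_polynomialMult : Prop := ∀ (a : List Int) (b : List Int), Dom_polynomialMult a b → Spec_polynomialMult a b (polynomialMult a b)

-- ===== LEMMAS AND PROOFS =====

-- the contribution to output index k of the a-coefficient x at position s
def pvContrib (bl : List Int) (k : Nat) (s : Nat) (x : Int) : Int :=
  if s ≤ k ∧ k < s + bl.length then PySem.Int.mod (x * bl.getD (k - s) 0) 929 else 0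

-- total contribution to output index k of the a-suffix l whose first element has position s
def pvS (bl : List Int) (k : Nat) : List Int → Nat → Int
  | [], _ => 0
  | x :: l, s => pvContrib bl k s x + pvS bl k l (s + 1)

lemma pv_getD_set (l : List Int) (i k : Nat) (v : Int) :
    (l.set i v).getD k 0 = if i = k ∧ k < l.length then v else l.getD k 0 := by
  induction l generalizing i k with
  | nil => simp [List.set]
  | cons x l ih =>
    cases i with
    | zero => cases k <;> simp [List.set, List.getD]
    | succ i =>
      cases k with
      | zero => simp [List.set, List.getD]
      | succ k => simpa [List.set, List.getD, Nat.succ_lt_succ_iff] using ih i k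

lemma pv_innerFold_length (i1 : Int) (o1 : Int) (l : List Int) :
    ∀ (s : Int) (res : List Int),
      ((PySem.List.enumerate l s).foldl (fun r q =>
        r.set (o1 + q.1).toNat (r.getD (o1 + q.1).toNat 0 + PySem.Int.mod (i1 * q.2) 929)) res).length
      = res.length := by
  induction l with
  | nil => intro s res; simp [PySem.List.enumerate_nil]
  | cons x l ih =>
    intro s res
    rw [PySem.List.enumerate_cons, List.foldl_cons, ih]
    simp

lemma pv_innerFold_getD (i1 : Int) (o1 : Nat) :
    ∀ (l : List Int) (sn : Nat) (res : List Int) (k : Nat),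
      o1 + sn + l.length ≤ res.length →
      ((PySem.List.enumerate l (sn : Int)).foldl (fun r q =>
        r.set ((o1 : Int) + q.1).toNat (r.getD ((o1 : Int) + q.1).toNat 0 + PySem.Int.mod (i1 * q.2) 929)) res).getD k 0
      = res.getD k 0 +
        (if o1 + sn ≤ k ∧ k < o1 + sn + l.length then PySem.Int.mod (i1 * l.getD (k - o1 - sn) 0) 929 else 0) := by
  intro l
  induction l with
  | nil =>
    intro sn res k _
    simp [PySem.List.enumerate_nil]
  | cons x l ih =>
    intro sn res k hlen
    simp only [List.length_cons] at hlen
    rw [PySem.List.enumerate_cons, List.foldl_cons]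
    have hcast : ((o1 : Int) + (sn : Int)).toNat = o1 + sn := by omega
    have hs : ((sn : Int) + 1) = ((sn + 1 : Nat) : Int) := by push_cast; ring
    set res' := res.set ((o1 : Int) + (sn : Int)).toNat
        (res.getD ((o1 : Int) + (sn : Int)).toNat 0 + PySem.Int.mod (i1 * x) 929) with hres'
    have hlen' : o1 + (sn + 1) + l.length ≤ res'.length := by
      rw [hres', List.length_set]; omega
    rw [hs, ih (sn + 1) res' k hlen']
    rw [hres', hcast, pv_getD_set]
    by_cases hk : o1 + sn = k
    · have hklt : k < res.length := by omega
      have h2 : ¬ (o1 + (sn + 1) ≤ k ∧ k < o1 + (sn + 1) + l.length) := by omega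
      have h1 : o1 + sn ≤ k ∧ k < o1 + sn + (x :: l).length := by
        simp only [List.length_cons]; omega
      rw [if_pos ⟨hk, hklt⟩, if_neg h2, if_pos h1]
      have h0 : k - o1 - sn = 0 := by omega
      simp [h0, hk, List.getD]
    · have hne : ¬ (o1 + sn = k ∧ k < res.length) := by tauto
      rw [if_neg hne]
      by_cases h2 : o1 + (sn + 1) ≤ k ∧ k < o1 + (sn + 1) + l.length
      · have h1 : o1 + sn ≤ k ∧ k < o1 + sn + (x :: l).length := by
          simp only [List.length_cons]; omega
        rw [if_pos h2, if_pos h1]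
        have hidx : k - o1 - sn = (k - o1 - (sn + 1)) + 1 := by omega
        simp [hidx, List.getD]
      · have h1 : ¬ (o1 + sn ≤ k ∧ k < o1 + sn + (x :: l).length) := by
          simp only [List.length_cons]; omega
        rw [if_neg h2, if_neg h1]

lemma pv_outerFold_length (bl : List Int) :
    ∀ (l : List Int) (s : Int) (res : List Int),
      ((PySem.List.enumerate l s).foldl (fun r p =>
        (PySem.List.enumerate bl 0).foldl (fun r q =>
          r.set (p.1 + q.1).toNat (r.getD (p.1 + q.1).toNat 0 + PySem.Int.mod (p.2 * q.2) 929)) r) res).length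
      = res.length := by
  intro l
  induction l with
  | nil => intro s res; simp [PySem.List.enumerate_nil]
  | cons x l ih =>
    intro s res
    rw [PySem.List.enumerate_cons, List.foldl_cons, ih]
    exact pv_innerFold_length x s bl 0 res

lemma pv_outerFold_getD (bl : List Int) :
    ∀ (l : List Int) (sn : Nat) (res : List Int) (k : Nat),
      sn + l.length + bl.length ≤ res.length + 1 →
      ((PySem.List.enumerate l (sn : Int)).foldl (fun r p =>
        (PySem.List.enumerate bl 0).foldl (fun r q =>
          r.set (p.1 + q.1).toNat (r.getD (p.1 + q.1).toNat 0 + PySem.Int.mod (p.2 * q.2) 929)) r) res).getD k 0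
      = res.getD k 0 + pvS bl k l sn := by
  intro l
  induction l with
  | nil => intro sn res k _; simp [PySem.List.enumerate_nil, pvS]
  | cons x l ih =>
    intro sn res k hlen
    simp only [List.length_cons] at hlen
    rw [PySem.List.enumerate_cons, List.foldl_cons]
    have hs : ((sn : Int) + 1) = ((sn + 1 : Nat) : Int) := by push_cast; ring
    set res' := (PySem.List.enumerate bl (0 : Int)).foldl (fun r q =>
      r.set ((sn : Int) + q.1).toNat (r.getD ((sn : Int) + q.1).toNat 0 + PySem.Int.mod (x * q.2) 929)) res with hres'
    have hlenres' : res'.length = res.length := by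
      rw [hres']; exact pv_innerFold_length x (sn : Int) bl 0 res
    have hlen' : (sn + 1) + l.length + bl.length ≤ res'.length + 1 := by
      rw [hlenres']; omega
    rw [hs, ih (sn + 1) res' k hlen']
    have hinner := pv_innerFold_getD x sn bl 0 res k (by omega)
    simp only [Nat.cast_zero, Nat.add_zero] at hinner
    rw [hres', hinner]
    simp only [pvS, pvContrib, Nat.sub_zero, Nat.add_zero]
    ring

lemma pv_foldl_add (g : Nat → Int) :
    ∀ (L : List Nat) (c : Int), L.foldl (fun acc i => acc + g i) c = c + (L.map g).sum := by
  intro L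
  induction L with
  | nil => intro c; simp
  | cons x L ih => intro c; simp [ih]; ring

lemma pv_range'_map_sum (g : Nat → Int) :
    ∀ (m s : Nat), ((List.range' s m).map g).sum = ∑ j ∈ Finset.range m, g (s + j) := by
  intro m
  induction m with
  | zero => intro s; simp
  | succ m ih =>
    intro s
    rw [List.range'_succ]
    simp only [List.map_cons, List.sum_cons, ih (s + 1)]
    rw [Finset.sum_range_succ', add_comm (g s)]
    congr 1
    apply Finset.sum_congr rfl
    intro j _
    congr 1
    omega

lemma pv_pvS_eq_sum (bl : List Int) (k : Nat) :
    ∀ (l : List Int) (s : Nat),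
      pvS bl k l s = ∑ j ∈ Finset.range l.length, pvContrib bl k (s + j) (l.getD j 0) := by
  intro l
  induction l with
  | nil => intro s; simp [pvS]
  | cons x l ih =>
    intro s
    simp only [pvS, List.length_cons, ih (s + 1)]
    rw [Finset.sum_range_succ', add_comm (pvContrib bl k s x)]
    congr 1
    apply Finset.sum_congr rfl
    intro j _
    rw [List.getD_cons_succ]
    congr 1
    omega

theorem polynomialMult_spec : Claim_equal_polynomialMult := by
  unfold Claim_equal_polynomialMult Spec_polynomialMult
  intro a b _
  have hA : polynomialMult a b =
      (PySem.List.enumerate a (0:Int)).foldl (fun r p =>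
        (PySem.List.enumerate b (0:Int)).foldl (fun r q =>
          r.set (p.1 + q.1).toNat (r.getD (p.1 + q.1).toNat 0 + PySem.Int.mod (p.2 * q.2) 929)) r)
        (List.replicate (a.length + b.length - 1) (0:Int)) := rfl
  have hB : polynomialMult_alt a b =
      (List.range (a.length + b.length - 1)).map (fun (k : Nat) =>
        (List.range' (max 0 ((k : Int) - (b.length : Int) + 1)).toNat
            (min (k : Int) ((a.length : Int) - 1) + 1 - max 0 ((k : Int) - (b.length : Int) + 1)).toNat).foldl
          (fun acc i => acc + PySem.Int.mod (a.getD i 0 * b.getD (k - i) 0) 929) 0) := rfl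
  rw [hA, hB]
  apply List.ext_getElem
  · rw [pv_outerFold_length b a 0 _]
    simp
  · intro k hk1 hk2
    simp only [List.length_map, List.length_range] at hk2
    -- A side: the k-th entry is pvS b k a 0
    have houter := pv_outerFold_getD b a 0 (List.replicate (a.length + b.length - 1) (0:Int)) k
      (by simp [List.length_replicate]; omega)
    simp only [Nat.cast_zero] at houter
    have hAval : ((PySem.List.enumerate a (0:Int)).foldl (fun r p =>
        (PySem.List.enumerate b (0:Int)).foldl (fun r q =>
          r.set (p.1 + q.1).toNat (r.getD (p.1 + q.1).toNat 0 + PySem.Int.mod (p.2 * q.2) 929)) r)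
        (List.replicate (a.length + b.length - 1) (0:Int))).getD k 0 = pvS b k a 0 := by
      rw [houter]; simp
    rw [← List.getD_eq_getElem _ 0 hk1, hAval]
    -- B side
    simp only [List.getElem_map, List.getElem_range]
    rw [pv_foldl_add, pv_range'_map_sum, pv_pvS_eq_sum]
    simp only [Nat.zero_add, zero_add]
    have hfilter :
        (Finset.range a.length).filter (fun j => j ≤ k ∧ k < j + b.length)
        = Finset.Ico (max 0 ((k : Int) - (b.length : Int) + 1)).toNat
            ((max 0 ((k : Int) - (b.length : Int) + 1)).toNat
              + (min (k : Int) ((a.length : Int) - 1) + 1 - max 0 ((k : Int) - (b.length : Int) + 1)).toNat) := by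
      ext j
      simp only [Finset.mem_filter, Finset.mem_range, Finset.mem_Ico]
      omega
    calc ∑ j ∈ Finset.range a.length, pvContrib b k j (a.getD j 0)
        = ∑ j ∈ (Finset.range a.length).filter (fun j => j ≤ k ∧ k < j + b.length),
            PySem.Int.mod (a.getD j 0 * b.getD (k - j) 0) 929 := by
          rw [Finset.sum_filter]
          apply Finset.sum_congr rfl
          intro j _
          simp [pvContrib]
      _ = ∑ j ∈ Finset.Ico (max 0 ((k : Int) - (b.length : Int) + 1)).toNat
              ((max 0 ((k : Int) - (b.length : Int) + 1)).toNat
                + (min (k : Int) ((a.length : Int) - 1) + 1 - max 0 ((k : Int) - (b.length : Int) + 1)).toNat),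
            PySem.Int.mod (a.getD j 0 * b.getD (k - j) 0) 929 := by rw [hfilter]
      _ = ∑ j ∈ Finset.range
              ((min (k : Int) ((a.length : Int) - 1) + 1 - max 0 ((k : Int) - (b.length : Int) + 1)).toNat),
            PySem.Int.mod (a.getD ((max 0 ((k : Int) - (b.length : Int) + 1)).toNat + j) 0
              * b.getD (k - ((max 0 ((k : Int) - (b.length : Int) + 1)).toNat + j)) 0) 929 := by
          rw [Finset.sum_Ico_eq_sum_range]
          simp
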